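-- pv_equiv track=rewrite | github.com/PingPingE/Algorithm | Programmers/카카오/징검다리 건너기.py | check
-- ===== SOURCE A (Python) =====
-- def check(k, stones, num):
--     count = 0 #건너뛴 횟수
--     cur = 0 #아직 해당구간(i~i+k)을 건너야하는 남은아이들
--     for i in range(len(stones)):
--         if count >0:
--             cur = stones[i]-(num+cur)+cur
--         else:
--             cur = stones[i] - num
--         if cur <0:
--             count +=1
--             if count == k:
--                 return False
--         else:
--             count = 0
--     return True
-- ===== SOURCE B (Python) =====
-- def check(k, stones, num):
--     # Scan maximal runs of consecutive stones with value below num;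
--     # crossing fails exactly when some run has length >= k (and k >= 1).
--     n = len(stones)
--     i = 0
--     while i < n:
--         if stones[i] >= num:
--             i += 1
--         else:
--             j = i
--             while j < n and stones[j] < num:
--                 j += 1
--             if 0 < k <= j - i:
--                 return False
--             i = j
--     return True
-- ===== Notes on version B (the rewrite author's own statement) =====
-- stated objective: alternative
-- what changed: Replaces A's single pass with a skip counter, redundant cur arithmetic and early-reset logic by an explicit scan of the maximal runs of consecutive stones below num, failing exactly when a run has length >= k.
import Mathlib
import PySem

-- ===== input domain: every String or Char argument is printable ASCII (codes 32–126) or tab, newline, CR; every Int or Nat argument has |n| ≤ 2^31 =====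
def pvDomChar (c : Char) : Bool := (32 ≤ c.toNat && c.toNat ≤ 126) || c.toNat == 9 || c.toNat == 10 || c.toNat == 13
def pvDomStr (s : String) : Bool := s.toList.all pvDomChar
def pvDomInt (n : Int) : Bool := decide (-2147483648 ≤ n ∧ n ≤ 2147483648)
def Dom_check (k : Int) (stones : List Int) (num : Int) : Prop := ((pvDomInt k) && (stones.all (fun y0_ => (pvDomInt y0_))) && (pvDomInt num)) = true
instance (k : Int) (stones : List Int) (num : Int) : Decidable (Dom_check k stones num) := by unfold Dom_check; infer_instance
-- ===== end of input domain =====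

-- B replaces A's skip-counter single pass by an explicit scan of maximal runs of stones below num (alternative decomposition, same O(n) cost).


-- ===== PORT A =====
-- for-loop over range(len(stones)) with state (count, cur) and early return False
def checkLoop (k num : Int) : List Int → Int → Int → Bool
  | [], _, _ => true
  | s :: t, count, cur =>
    let cur' := if count > 0 then s - (num + cur) + cur else s - num
    if cur' < 0 then
      if count + 1 = k then false else checkLoop k num t (count + 1) cur'
    else checkLoop k num t 0 cur'

def check (k : Int) (stones : List Int) (num : Int) : Bool :=
  checkLoop k num stones 0 0

-- ===== PORT B =====
-- inner while: j < n and stones[j] < num  →  first index ≥ j ending the run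
def altInner (stones : List Int) (num : Int) (n : Nat) (j : Nat) : Nat :=
  if h : j < n then
    if stones.getD j 0 < num then altInner stones num n (j + 1) else j
  else j
  termination_by n - j
  decreasing_by omega

theorem altInner_ge (stones : List Int) (num : Int) (n j : Nat) :
    j ≤ altInner stones num n j := by
  fun_induction altInner with
  | case1 j h hlt ih => omega
  | case2 j h hlt => omega
  | case3 j h => omega

theorem altInner_gt (stones : List Int) (num : Int) (n j : Nat)
    (h : j < n) (hs : stones.getD j 0 < num) : j < altInner stones num n j := by
  rw [altInner]
  simp only [h, dif_pos, hs, if_pos]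
  exact Nat.lt_of_lt_of_le (Nat.lt_succ_self j) (altInner_ge stones num n (j + 1))

-- outer while over i
def altOuter (k num : Int) (stones : List Int) (n : Nat) (i : Nat) : Bool :=
  if h : i < n then
    if num ≤ stones.getD i 0 then altOuter k num stones n (i + 1)
    else
      let j := altInner stones num n i
      if 0 < k ∧ k ≤ (j : Int) - (i : Int) then false
      else altOuter k num stones n j
  else true
  termination_by n - i
  decreasing_by
  · omega
  · have := altInner_gt stones num n i h (by omega)
    omega

def check_alt (k : Int) (stones : List Int) (num : Int) : Bool :=
  altOuter k num stones stones.length 0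

-- ===== PRECONDITION & SPEC =====
def Spec_check (k : Int) (stones : List Int) (num : Int) (out : Bool) : Prop := out = check_alt k stones num
instance (k : Int) (stones : List Int) (num : Int) (out : Bool) : Decidable (Spec_check k stones num out) := by unfold Spec_check; infer_instance

-- ===== CLAIM (what is proved, stated in full; the proofs are below) =====
def Claim_equal_check : Prop := ∀ (k : Int) (stones : List Int) (num : Int), Dom_check k stones num → Spec_check k stones num (check k stones num)

-- ===== LEMMAS AND PROOFS =====

-- A's cur is recomputed fresh each step and both branch formulas equal s - num,
-- so the loop value does not depend on cur.
def refLoop (k num : Int) : List Int → Int → Bool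
  | [], _ => true
  | s :: t, count =>
    if s - num < 0 then
      if count + 1 = k then false else refLoop k num t (count + 1)
    else refLoop k num t 0

theorem checkLoop_eq_ref (k num : Int) (l : List Int) (count cur : Int) :
    checkLoop k num l count cur = refLoop k num l count := by
  induction l generalizing count cur with
  | nil => rfl
  | cons s t ih =>
    simp only [checkLoop, refLoop]
    have h : (if count > 0 then s - (num + cur) + cur else s - num) = s - num := by
      split <;> ring
    rw [h]
    split_ifs <;> simp [ih]

-- refLoop on a run of below-num stones followed by a rest whose head (if any) is ≥ num
theorem refLoop_run (k num : Int) (run rest : List Int)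
    (hrun : ∀ x ∈ run, x < num)
    (hrest : rest = [] ∨ ∃ h t, rest = h :: t ∧ num ≤ h) (count : Int) :
    refLoop k num (run ++ rest) count =
      if count < k ∧ k ≤ count + (run.length : Int) then false else refLoop k num rest 0 := by
  induction run generalizing count with
  | nil =>
    simp only [List.nil_append, List.length_nil, Nat.cast_zero]
    rw [if_neg (by omega : ¬ (count < k ∧ k ≤ count + (0 : Int)))]
    rcases hrest with h | ⟨h, t, rfl, hge⟩
    · subst h; rfl
    · simp only [refLoop]
      have : ¬ (h - num < 0) := by omega
      rw [if_neg this, if_neg this]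
  | cons s run' ih =>
    have hs : s < num := hrun s (by simp)
    simp only [List.cons_append, refLoop, List.length_cons]
    rw [if_pos (by omega : s - num < 0)]
    rw [ih (fun x hx => hrun x (by simp [hx]))]
    by_cases hk : count + 1 = k
    · rw [if_pos hk, if_pos (by push_cast; omega)]
    · rw [if_neg hk]
      by_cases h2 : count + 1 < k ∧ k ≤ count + 1 + (run'.length : Int)
      · rw [if_pos h2, if_pos (by push_cast at h2 ⊢; omega)]
      · rw [if_neg h2, if_neg (by push_cast at h2 ⊢; omega)]

-- full characterisation of altInner
theorem altInner_spec (stones : List Int) (num : Int) (n j : Nat) (hjn : j ≤ n) :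
    altInner stones num n j ≤ n ∧
    (∀ m, j ≤ m → m < altInner stones num n j → stones.getD m 0 < num) ∧
    (altInner stones num n j = n ∨ num ≤ stones.getD (altInner stones num n j) 0) := by
  fun_induction altInner with
  | case1 j h hlt ih =>
    obtain ⟨h1, h2, h3⟩ := ih (by omega)
    refine ⟨h1, ?_, h3⟩
    intro m hm1 hm2
    rcases Nat.eq_or_lt_of_le hm1 with rfl | hlt2
    · exact hlt
    · exact h2 m hlt2 hm2
  | case2 j h hlt => exact ⟨by omega, by omega, Or.inr (by omega)⟩
  | case3 j h => exact ⟨by omega, by omega, Or.inl (by omega)⟩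

theorem drop_split (stones : List Int) (i j : Nat) (hij : i ≤ j) :
    stones.drop i = (stones.drop i).take (j - i) ++ stones.drop j := by
  conv_lhs => rw [← List.take_append_drop (j - i) (stones.drop i)]
  rw [List.drop_drop, Nat.add_sub_cancel' hij]

-- main bridge: altOuter equals refLoop on the dropped suffix
theorem altOuter_eq_refLoop (k num : Int) (stones : List Int) (i : Nat)
    (hi : i ≤ stones.length) :
    altOuter k num stones stones.length i = refLoop k num (stones.drop i) 0 := by
  fun_induction altOuter with
  | case1 i h hge ih =>
    rw [ih (by omega)]
    rw [List.drop_eq_getElem_cons h]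
    simp only [refLoop]
    have : stones.getD i 0 = stones[i] := List.getD_eq_getElem stones 0 h
    rw [if_neg (by omega)]
  | case2 i h hlt j hcond =>
    -- run branch, k fires: refLoop must also return false
    have hj : j = altInner stones num stones.length i := rfl
    obtain ⟨hjn, hall, hend⟩ := altInner_spec stones num stones.length i (by omega)
    rw [← hj] at hjn hall hend
    have hij : i < j := hj ▸ altInner_gt stones num stones.length i h (by omega)
    rw [drop_split stones i j (by omega)]
    rw [refLoop_run k num _ _ ?_ ?_ 0]
    · rw [if_pos ?_]
      have hlen : ((stones.drop i).take (j - i)).length = j - i := by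
        simp; omega
      rw [hlen]
      omega
    · intro x hx
      rw [List.mem_iff_getElem] at hx
      obtain ⟨m, hm, rfl⟩ := hx
      have hlen : ((stones.drop i).take (j - i)).length = j - i := by simp; omega
      rw [hlen] at hm
      rw [List.getElem_take, List.getElem_drop]
      have := hall (i + m) (by omega) (by omega)
      rwa [List.getD_eq_getElem stones 0 (by omega)] at this
    · rcases Nat.eq_or_lt_of_le hjn with heq | hlt2
      · left; rw [heq, List.drop_length]
      · right
        refine ⟨stones[j], stones.drop (j + 1), List.drop_eq_getElem_cons hlt2, ?_⟩
        rcases hend with h3 | h3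
        · omega
        · rwa [List.getD_eq_getElem stones 0 (by omega)] at h3
  | case3 i h hlt j hcond ih =>
    have hj : j = altInner stones num stones.length i := rfl
    obtain ⟨hjn, hall, hend⟩ := altInner_spec stones num stones.length i (by omega)
    rw [← hj] at hjn hall hend
    have hij : i < j := hj ▸ altInner_gt stones num stones.length i h (by omega)
    rw [ih hjn]
    rw [drop_split stones i j (by omega)]
    rw [refLoop_run k num _ _ ?_ ?_ 0]
    · rw [if_neg ?_]
      have hlen : ((stones.drop i).take (j - i)).length = j - i := by simp; omega
      rw [hlen]
      omega
    · intro x hx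
      rw [List.mem_iff_getElem] at hx
      obtain ⟨m, hm, rfl⟩ := hx
      have hlen : ((stones.drop i).take (j - i)).length = j - i := by simp; omega
      rw [hlen] at hm
      rw [List.getElem_take, List.getElem_drop]
      have := hall (i + m) (by omega) (by omega)
      rwa [List.getD_eq_getElem stones 0 (by omega)] at this
    · rcases Nat.eq_or_lt_of_le hjn with heq | hlt2
      · left; rw [heq, List.drop_length]
      · right
        refine ⟨stones[j], stones.drop (j + 1), List.drop_eq_getElem_cons hlt2, ?_⟩
        rcases hend with h3 | h3
        · omega
        · rwa [List.getD_eq_getElem stones 0 (by omega)] at h3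
  | case4 i h => rw [List.drop_of_length_le (by omega)]; rfl

-- ===== VERDICT (by name: the statement is the Claim_ definition above) =====
theorem check_spec : Claim_equal_check := by
  intro k stones num _
  unfold Spec_check check check_alt
  rw [checkLoop_eq_ref, altOuter_eq_refLoop k num stones 0 (by omega)]
  rfl
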